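-- pv_equiv track=rewrite | github.com/sibishan/blartsabre | benchmarks/utils.py | stats_from_our_telesabre_log
-- ===== SOURCE A (Python) =====
-- def ops_from_our_log(gate_execution_log):
--     ops = []
--     for op, payload in gate_execution_log:
--         if op == "SWAP":
--             p1, p2 = map(int, payload)
--             ops.append(("move", p1, p2))
--
--         elif op == "Teleport":
--             p1, p2, p3 = map(int, payload)
--             ops.append(("move", p1, p2, p3))
--
--         elif op == "Telegate":
--             p1, p2, p3, p4 = map(int, payload)
--             ops.append(("move", p1, p2, p3, p4))
--
--         else:
--             # executed gate, you said only CX and SWAP matter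
--             name = str(op).upper()
--             if "CX" in name:
--                 p1, p2 = map(int, payload)
--                 ops.append(("gate", p1, p2))
--
--     return ops
--
-- def mapped_ops(operations, num_phys_qubits):
--     swap_count = 0
--     teleportation_count = 0
--     telegate_count = 0
--
--     used_qubits = [False] * num_phys_qubits
--     for op in operations:
--         tag = op[0]
--         qubits = op[1:]
--
--         if tag == "move":
--             if len(qubits) == 2 and any(used_qubits[q] for q in qubits):
--                 swap_count += 1
--                 for q in qubits:
--                     used_qubits[q] = True
--
--             elif len(qubits) == 3 and any(used_qubits[q] for q in qubits):
--                 teleportation_count += 1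
--                 for q in qubits:
--                     used_qubits[q] = True
--
--             elif len(qubits) == 4:
--                 telegate_count += 1
--                 for q in qubits:
--                     used_qubits[q] = True
--
--         elif tag == "gate":
--             for q in qubits:
--                 used_qubits[q] = True
--
--     return swap_count, teleportation_count, telegate_count
--
-- def mapped_depth(operations, num_phys_qubits, tp_duration=5):
--     qubit_depths = [0] * num_phys_qubits
--     qubit_depths_tp = [0] * num_phys_qubits
--
--     for op in operations:
--         qubits = op[1:]
--         max_depth = max(qubit_depths[p] for p in qubits)
--
--         duration = 1
--         if op[0] == "move":
--             if len(qubits) == 2: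
--                 duration = 1
--             elif len(qubits) in (3, 4):
--                 duration = tp_duration
--
--         for p in qubits:
--             qubit_depths[p] = max_depth + duration
--             if op[0] == "move" and len(qubits) > 2:
--                 qubit_depths_tp[p] = max_depth + duration
--
--     circuit_depth = max(qubit_depths) if qubit_depths else 0
--     teleport_depth = max(qubit_depths_tp) if qubit_depths_tp else 0
--     return circuit_depth, teleport_depth
--
-- def stats_from_our_telesabre_log(gate_execution_log, num_phys_qubits):
--     ops = ops_from_our_log(gate_execution_log)
--
--     (swap_count, teleport_count, telegate_count) = mapped_ops(ops, num_phys_qubits)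
--
--     depth, tp_depth = mapped_depth(ops, num_phys_qubits, tp_duration=5)
--
--     cx_count = sum(1 for op in ops if op[0] == "gate" and len(op[1:]) == 2)
--
--     return {
--         "mapped_swaps": swap_count,
--         "mapped_teleports": teleport_count,
--         "mapped_telegates": telegate_count,
--         "mapped_depth": depth,
--         "mapped_teleport_depth": tp_depth,
--         "mapped_cx": cx_count,
--     }
-- ===== SOURCE B (Python) =====
-- def stats_from_our_telesabre_log(gate_execution_log, num_phys_qubits):
--     # One fused pass over the log: no intermediate ops list, no separate
--     # counting / depth / cx passes.
--     swap = tp = tg = cx = 0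
--     used = [False] * num_phys_qubits
--     depths = [0] * num_phys_qubits
--     depths_tp = [0] * num_phys_qubits
--
--     for op, payload in gate_execution_log:
--         if op in ("SWAP", "Teleport", "Telegate"):
--             kind = "move"
--         elif "CX" in str(op).upper():
--             kind = "gate"
--         else:
--             continue
--         qubits = [int(q) for q in payload]
--         n = len(qubits)
--
--         if kind == "move":
--             if n == 4 or any(used[q] for q in qubits):
--                 if n == 2:
--                     swap += 1
--                 elif n == 3:
--                     tp += 1
--                 else:
--                     tg += 1
--                 for q in qubits:
--                     used[q] = True
--         else:
--             cx += 1
--             for q in qubits: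
--                 used[q] = True
--
--         d = max(depths[q] for q in qubits) + (5 if kind == "move" and n > 2 else 1)
--         for q in qubits:
--             depths[q] = d
--             if kind == "move" and n > 2:
--                 depths_tp[q] = d
--
--     return {
--         "mapped_swaps": swap,
--         "mapped_teleports": tp,
--         "mapped_telegates": tg,
--         "mapped_depth": max(depths) if depths else 0,
--         "mapped_teleport_depth": max(depths_tp) if depths_tp else 0,
--         "mapped_cx": cx,
--     }
-- ===== Notes on version B (the rewrite author's own statement) =====
-- stated objective: simpler
-- what changed: Replaced A's intermediate ops list plus three separate aggregation passes (mapped_ops, mapped_depth, cx sum) by one fused loop over the log that classifies each entry and maintains counts, used-qubit flags and both depth arrays in a single state.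
import Mathlib
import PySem

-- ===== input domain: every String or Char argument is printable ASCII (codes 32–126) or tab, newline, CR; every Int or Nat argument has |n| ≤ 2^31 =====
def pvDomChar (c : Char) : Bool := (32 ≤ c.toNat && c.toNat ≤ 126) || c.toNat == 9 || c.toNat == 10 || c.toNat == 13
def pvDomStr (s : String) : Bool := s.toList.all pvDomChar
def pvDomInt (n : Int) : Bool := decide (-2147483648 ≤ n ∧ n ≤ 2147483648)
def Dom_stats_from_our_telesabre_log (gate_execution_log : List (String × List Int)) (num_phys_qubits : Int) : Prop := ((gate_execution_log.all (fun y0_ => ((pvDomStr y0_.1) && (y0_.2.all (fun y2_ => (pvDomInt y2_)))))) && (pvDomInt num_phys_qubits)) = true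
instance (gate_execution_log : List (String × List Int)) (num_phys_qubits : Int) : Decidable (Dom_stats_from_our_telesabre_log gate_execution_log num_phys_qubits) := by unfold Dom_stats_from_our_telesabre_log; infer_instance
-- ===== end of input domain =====

-- ===== PORT A =====
-- B changes decomposition only: one fused pass instead of ops-list + three passes; equivalence on Pre_ (non-raising inputs).

-- shared Python-list primitives (used by both ports; exact list-index semantics incl. negative wrap)
def pvAnyUsed (used : List Bool) (qs : List Int) : Bool :=
  qs.any (fun q => PySem.List.pyGetD used q false)

def pvMark (used : List Bool) (qs : List Int) : List Bool :=
  qs.foldl (fun u q => PySem.List.pySetD u q true) used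

def pvMaxOver (d : List Int) (qs : List Int) : Int :=
  (PySem.List.max? (qs.map fun q => PySem.List.pyGetD d q 0) (fun y => y)).getD 0

def pvSetAll (d : List Int) (qs : List Int) (v : Int) : List Int :=
  qs.foldl (fun l q => PySem.List.pySetD l q v) d

-- ops_from_our_log: each branch unpacks the payload (raises on arity mismatch -> excluded by Pre_) and appends one tuple;
-- map(int, payload) is the identity on List Int. Tuples ("move", p1, ...) are encoded as (tag, qubit list).
def pvClassifyA (e : String × List Int) : List (String × List Int) :=
  if e.1 == "SWAP" then
    (if e.2.length == 2 then [("move", e.2)] else [])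
  else if e.1 == "Teleport" then
    (if e.2.length == 3 then [("move", e.2)] else [])
  else if e.1 == "Telegate" then
    (if e.2.length == 4 then [("move", e.2)] else [])
  else if PySem.Str.isIn "CX" (PySem.Str.upper e.1) then
    (if e.2.length == 2 then [("gate", e.2)] else [])
  else []

def pvOpsFromOurLog (log : List (String × List Int)) : List (String × List Int) :=
  log.foldl (fun acc e => acc ++ pvClassifyA e) []

-- mapped_ops loop body
def pvCountStep (st : (Int × Int × Int) × List Bool) (o : String × List Int) : (Int × Int × Int) × List Bool :=
  if o.1 == "move" then
    (if o.2.length == 2 && pvAnyUsed st.2 o.2 then ((st.1.1 + 1, st.1.2.1, st.1.2.2), pvMark st.2 o.2)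
     else if o.2.length == 3 && pvAnyUsed st.2 o.2 then ((st.1.1, st.1.2.1 + 1, st.1.2.2), pvMark st.2 o.2)
     else if o.2.length == 4 then ((st.1.1, st.1.2.1, st.1.2.2 + 1), pvMark st.2 o.2)
     else st)
  else if o.1 == "gate" then (st.1, pvMark st.2 o.2)
  else st

-- mapped_depth loop body (tp_duration = 5)
def pvDepthStep (st : List Int × List Int) (o : String × List Int) : List Int × List Int :=
  let md := pvMaxOver st.1 o.2
  let dur : Int :=
    if o.1 == "move" then
      (if o.2.length == 2 then 1 else if o.2.length == 3 || o.2.length == 4 then 5 else 1)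
    else 1
  (pvSetAll st.1 o.2 (md + dur),
   if o.1 == "move" && decide (2 < o.2.length) then pvSetAll st.2 o.2 (md + dur) else st.2)

def pvCxStep (c : Int) (o : String × List Int) : Int :=
  if o.1 == "gate" && o.2.length == 2 then c + 1 else c

def stats_from_our_telesabre_log (gate_execution_log : List (String × List Int)) (num_phys_qubits : Int) : List (String × Int) :=
  let ops := pvOpsFromOurLog gate_execution_log
  let cs := ops.foldl pvCountStep ((0, 0, 0), List.replicate num_phys_qubits.toNat false)
  let ds := ops.foldl pvDepthStep
      (List.replicate num_phys_qubits.toNat 0, List.replicate num_phys_qubits.toNat 0)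
  let cx := ops.foldl pvCxStep 0
  [("mapped_swaps", cs.1.1), ("mapped_teleports", cs.1.2.1), ("mapped_telegates", cs.1.2.2),
   ("mapped_depth", (PySem.List.max? ds.1 (fun y => y)).getD 0),
   ("mapped_teleport_depth", (PySem.List.max? ds.2 (fun y => y)).getD 0),
   ("mapped_cx", cx)]

-- ===== PORT B =====
-- one fused loop; state = ((swap, tp, tg, cx), used, depths, depths_tp)
def pvBStep (st : (Int × Int × Int × Int) × List Bool × List Int × List Int)
    (e : String × List Int) : (Int × Int × Int × Int) × List Bool × List Int × List Int :=
  let kind : Option String :=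
    if e.1 == "SWAP" || e.1 == "Teleport" || e.1 == "Telegate" then some "move"
    else if PySem.Str.isIn "CX" (PySem.Str.upper e.1) then some "gate"
    else none
  match kind with
  | none => st
  | some k =>
    let qs := e.2
    let n := qs.length
    let cu : (Int × Int × Int × Int) × List Bool :=
      if k == "move" then
        (if n == 4 || pvAnyUsed st.2.1 qs then
          ((if n == 2 then (st.1.1 + 1, st.1.2.1, st.1.2.2.1, st.1.2.2.2)
            else if n == 3 then (st.1.1, st.1.2.1 + 1, st.1.2.2.1, st.1.2.2.2)
            else (st.1.1, st.1.2.1, st.1.2.2.1 + 1, st.1.2.2.2)), pvMark st.2.1 qs)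
         else (st.1, st.2.1))
      else ((st.1.1, st.1.2.1, st.1.2.2.1, st.1.2.2.2 + 1), pvMark st.2.1 qs)
    let dd := pvMaxOver st.2.2.1 qs + (if k == "move" && decide (2 < n) then 5 else 1)
    (cu.1, cu.2, pvSetAll st.2.2.1 qs dd,
     if k == "move" && decide (2 < n) then pvSetAll st.2.2.2 qs dd else st.2.2.2)

def stats_from_our_telesabre_log_alt (gate_execution_log : List (String × List Int)) (num_phys_qubits : Int) : List (String × Int) :=
  let fin := gate_execution_log.foldl pvBStep
    ((0, 0, 0, 0), List.replicate num_phys_qubits.toNat false,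
     List.replicate num_phys_qubits.toNat 0, List.replicate num_phys_qubits.toNat 0)
  [("mapped_swaps", fin.1.1), ("mapped_teleports", fin.1.2.1), ("mapped_telegates", fin.1.2.2.1),
   ("mapped_depth", (PySem.List.max? fin.2.2.1 (fun y => y)).getD 0),
   ("mapped_teleport_depth", (PySem.List.max? fin.2.2.2 (fun y => y)).getD 0),
   ("mapped_cx", fin.1.2.2.2)]

-- ===== PRECONDITION & SPEC =====
-- Pre_ excludes exactly the inputs on which Python A raises: a processed entry (SWAP/Teleport/Telegate/...CX...)
-- whose payload has the wrong arity (tuple-unpack ValueError) or a qubit index outside [-n, n) (IndexError).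
def Pre_stats_from_our_telesabre_log (gate_execution_log : List (String × List Int)) (num_phys_qubits : Int) : Prop :=
  ∀ e ∈ gate_execution_log,
    (e.1 = "SWAP" → e.2.length = 2) ∧
    (e.1 = "Teleport" → e.2.length = 3) ∧
    (e.1 = "Telegate" → e.2.length = 4) ∧
    (e.1 ≠ "SWAP" ∧ e.1 ≠ "Teleport" ∧ e.1 ≠ "Telegate" ∧
       PySem.Str.isIn "CX" (PySem.Str.upper e.1) = true → e.2.length = 2) ∧
    ((e.1 = "SWAP" ∨ e.1 = "Teleport" ∨ e.1 = "Telegate" ∨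
       PySem.Str.isIn "CX" (PySem.Str.upper e.1) = true) →
       ∀ q ∈ e.2, -num_phys_qubits ≤ q ∧ q < num_phys_qubits)

instance (gate_execution_log : List (String × List Int)) (num_phys_qubits : Int) : Decidable (Pre_stats_from_our_telesabre_log gate_execution_log num_phys_qubits) := by
  unfold Pre_stats_from_our_telesabre_log; infer_instance

def pvWitness_stats_from_our_telesabre_log : (List (String × List Int)) × Int :=
  ([("SWAP", [0, 1]), ("cx 0 2", [0, 2]), ("Teleport", [0, 1, 2]), ("Telegate", [0, 1, 2, 3]), ("barrier", [])], 4)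

def Spec_stats_from_our_telesabre_log (gate_execution_log : List (String × List Int)) (num_phys_qubits : Int) (out : List (String × Int)) : Prop := out = stats_from_our_telesabre_log_alt gate_execution_log num_phys_qubits
instance (gate_execution_log : List (String × List Int)) (num_phys_qubits : Int) (out : List (String × Int)) : Decidable (Spec_stats_from_our_telesabre_log gate_execution_log num_phys_qubits out) := by unfold Spec_stats_from_our_telesabre_log; infer_instance

-- ===== CLAIM (what is proved, stated in full; the proofs are below) =====
def Claim_equal_stats_from_our_telesabre_log : Prop := ∀ (gate_execution_log : List (String × List Int)) (num_phys_qubits : Int), Dom_stats_from_our_telesabre_log gate_execution_log num_phys_qubits → Pre_stats_from_our_telesabre_log gate_execution_log num_phys_qubits → Spec_stats_from_our_telesabre_log gate_execution_log num_phys_qubits (stats_from_our_telesabre_log gate_execution_log num_phys_qubits)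

-- ===== LEMMAS AND PROOFS =====

-- per-entry condition extracted from Pre_
def pvOkEntry (n : Int) (e : String × List Int) : Prop :=
    (e.1 = "SWAP" → e.2.length = 2) ∧
    (e.1 = "Teleport" → e.2.length = 3) ∧
    (e.1 = "Telegate" → e.2.length = 4) ∧
    (e.1 ≠ "SWAP" ∧ e.1 ≠ "Teleport" ∧ e.1 ≠ "Telegate" ∧
       PySem.Str.isIn "CX" (PySem.Str.upper e.1) = true → e.2.length = 2) ∧
    ((e.1 = "SWAP" ∨ e.1 = "Teleport" ∨ e.1 = "Telegate" ∨
       PySem.Str.isIn "CX" (PySem.Str.upper e.1) = true) →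
       ∀ q ∈ e.2, -n ≤ q ∧ q < n)

-- the composed A-side state after the ops of one entry
lemma pvStep_fuse (n : Int) (e : String × List Int) (he : pvOkEntry n e)
    (s t g c : Int) (used : List Bool) (d dtp : List Int) :
    pvBStep ((s, t, g, c), used, d, dtp) e =
      (((((pvClassifyA e).foldl pvCountStep ((s, t, g), used)).1.1,
         ((pvClassifyA e).foldl pvCountStep ((s, t, g), used)).1.2.1,
         ((pvClassifyA e).foldl pvCountStep ((s, t, g), used)).1.2.2,
         (pvClassifyA e).foldl pvCxStep c),
        ((pvClassifyA e).foldl pvCountStep ((s, t, g), used)).2,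
        ((pvClassifyA e).foldl pvDepthStep (d, dtp)).1,
        ((pvClassifyA e).foldl pvDepthStep (d, dtp)).2)) := by
  obtain ⟨h1, h2, h3, h4, -⟩ := he
  by_cases hs : e.1 = "SWAP"
  · have hl := h1 hs
    by_cases ha : pvAnyUsed used e.2 <;>
      simp [pvBStep, pvClassifyA, pvCountStep, pvDepthStep, pvCxStep, hs, hl, ha]
  · by_cases ht : e.1 = "Teleport"
    · have hl := h2 ht
      by_cases ha : pvAnyUsed used e.2 <;>
        simp [pvBStep, pvClassifyA, pvCountStep, pvDepthStep, pvCxStep, ht, hl, ha]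
    · by_cases hg : e.1 = "Telegate"
      · have hl := h3 hg
        simp [pvBStep, pvClassifyA, pvCountStep, pvDepthStep, pvCxStep, hg, hl]
      · by_cases hc : PySem.Str.isIn "CX" (PySem.Str.upper e.1) = true
        · have hl := h4 ⟨hs, ht, hg, hc⟩
          have hc' : PySem.Chars.isIn ['C', 'X'] (PySem.Chars.upper e.1.toList) = true := by
            simpa using hc
          simp [pvBStep, pvClassifyA, pvCountStep, pvDepthStep, pvCxStep, hs, ht, hg, hc', hl]
        · have hc' : ¬ PySem.Chars.isIn ['C', 'X'] (PySem.Chars.upper e.1.toList) = true := by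
            simpa using hc
          simp [pvBStep, pvClassifyA, hs, ht, hg, hc']

-- main fusion lemma
lemma pvFold_fuse (n : Int) :
    ∀ (log : List (String × List Int)), (∀ e ∈ log, pvOkEntry n e) →
    ∀ (s t g c : Int) (used : List Bool) (d dtp : List Int),
    log.foldl pvBStep ((s, t, g, c), used, d, dtp) =
      ((((log.flatMap pvClassifyA).foldl pvCountStep ((s, t, g), used)).1.1,
        ((log.flatMap pvClassifyA).foldl pvCountStep ((s, t, g), used)).1.2.1,
        ((log.flatMap pvClassifyA).foldl pvCountStep ((s, t, g), used)).1.2.2,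
        (log.flatMap pvClassifyA).foldl pvCxStep c),
       ((log.flatMap pvClassifyA).foldl pvCountStep ((s, t, g), used)).2,
       ((log.flatMap pvClassifyA).foldl pvDepthStep (d, dtp)).1,
       ((log.flatMap pvClassifyA).foldl pvDepthStep (d, dtp)).2) := by
  intro log
  induction log with
  | nil => intro _ s t g c used d dtp; rfl
  | cons e l ih =>
    intro hok s t g c used d dtp
    have he : pvOkEntry n e := hok e (by simp)
    have hl : ∀ x ∈ l, pvOkEntry n x := fun x hx => hok x (by simp [hx])
    simp only [List.foldl_cons, List.flatMap_cons, List.foldl_append]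
    rw [pvStep_fuse n e he s t g c used d dtp]
    exact ih hl _ _ _ _ _ _ _

-- ===== VERDICT (by name: the statement is the Claim_ definition above) =====
theorem stats_from_our_telesabre_log_spec : Claim_equal_stats_from_our_telesabre_log := by
  intro log n _ hpre
  show _ = _
  unfold stats_from_our_telesabre_log stats_from_our_telesabre_log_alt pvOpsFromOurLog
  rw [PySem.List.foldl_append_eq_flatMap]
  rw [pvFold_fuse n log hpre 0 0 0 0 (List.replicate n.toNat false)
       (List.replicate n.toNat 0) (List.replicate n.toNat 0)]
  simp only [List.nil_append]
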